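-- pv_equiv track=rewrite | github.com/maflAT/foobar | 03_hey-i-already-did-that.py | solution
-- ===== SOURCE A (Python) =====
-- from itertools import count
--
-- def solution(n, b):
--     k = len(n)
--     numbers = {}
--     for i in count():
--         # remember n and its position in the sequence
--         numbers[n] = i
--
--         # calculate x and y as strings containing the sorted digits of n
--         y = ''.join(sorted(n))
--         x = y[::-1]
--
--         # convert x and y to int and calculate z as x - y
--         z = from_base_x(x, b) - from_base_x(y, b)
--
--         # convert z back to string in base b, padding to length k with zeros
--         n = in_base_x(z, b).rjust(k, '0')
--
--         # search for previous occurance of n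
--         # if found, return difference between index of n and length of list
--         # else repeat from above
--         if n in numbers: return len(numbers) - numbers[n]
--
-- def from_base_x(num_string, base):
--     """get integer value of number, that is represented as str in base x"""
--     if not 2 <= base <= 10:
--         raise ValueError("Base must be between 2 and 10!")
--     num_int = 0
--     for position, digit in enumerate(reversed(num_string), 0):
--         if int(digit) >= base:
--             raise ValueError('All digits must be smaller than base!')
--         num_int += int(digit) * base ** position
--     return num_int
--
-- def in_base_x(num, base):
--     """convert integer number to string of number in base x"""
--     if not 2 <= base <= 10:
--         raise ValueError("Base must be between 2 and 10!")
--     num_string = ''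
--     while num > 0:
--         num_string = str(num % base) + num_string
--         num //= base
--     return num_string
-- ===== SOURCE B (Python) =====
-- def solution(n, b):
--     k = len(n)
--
--     def step(m):
--         y = ''.join(sorted(m))
--         x = y[::-1]
--         z = from_base_x(x, b) - from_base_x(y, b)
--         return in_base_x(z, b).rjust(k, '0')
--
--     # Floyd's tortoise-and-hare: find a point on the cycle without a memo table.
--     slow, fast = step(n), step(step(n))
--     while slow != fast:
--         slow, fast = step(slow), step(step(fast))
--     # slow is now on the cycle; walk once around it to measure its length.
--     length, p = 1, step(slow)
--     while p != slow:
--         length, p = length + 1, step(p)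
--     return length
--
--
-- def from_base_x(num_string, base):
--     """get integer value of number, that is represented as str in base x"""
--     if not 2 <= base <= 10:
--         raise ValueError("Base must be between 2 and 10!")
--     num_int = 0
--     for position, digit in enumerate(reversed(num_string), 0):
--         if int(digit) >= base:
--             raise ValueError('All digits must be smaller than base!')
--         num_int += int(digit) * base ** position
--     return num_int
--
--
-- def in_base_x(num, base):
--     """convert integer number to string of number in base x"""
--     if not 2 <= base <= 10:
--         raise ValueError("Base must be between 2 and 10!")
--     num_string = ''
--     while num > 0:
--         num_string = str(num % base) + num_string
--         num //= base
--     return num_string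
-- ===== Notes on version B (the rewrite author's own statement) =====
-- stated objective: alternative
-- what changed: Replaces the memo-dict loop (store every state, stop at first revisit, answer = len - stored index) by Floyd's tortoise-and-hare cycle detection: no table is kept, a slow/fast pointer pair finds a point on the cycle and a second one-step walk around the cycle measures its length, which equals A's first-repeat distance.
import Mathlib
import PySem

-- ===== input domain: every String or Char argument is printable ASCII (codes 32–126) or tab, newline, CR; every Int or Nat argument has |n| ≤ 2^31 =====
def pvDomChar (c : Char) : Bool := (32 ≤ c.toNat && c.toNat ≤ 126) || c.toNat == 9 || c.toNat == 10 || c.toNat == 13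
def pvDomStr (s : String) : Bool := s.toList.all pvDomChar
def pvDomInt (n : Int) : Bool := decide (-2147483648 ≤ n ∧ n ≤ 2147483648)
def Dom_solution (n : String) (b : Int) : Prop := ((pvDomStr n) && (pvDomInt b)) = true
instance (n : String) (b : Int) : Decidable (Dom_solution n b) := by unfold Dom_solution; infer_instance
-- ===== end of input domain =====

-- B replaces A's memo-dict first-revisit search by Floyd's tortoise-and-hare cycle detection
-- (O(1) memory instead of a table); both return the cycle length of the digit-sort-subtract map.

-- ===== PORT A =====

-- int(digit): exact for the single digit chars '0'..'9' that Pre_solution admits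
def pvDigitVal (c : Char) : Int := (c.toNat : Int) - 48

-- from_base_x without the two raise-guards (Pre_solution rules out both ValueErrors);
-- the enumerate/reversed loop and the power computation are kept as in the Python.
def pvFromBase (s : List Char) (b : Int) : Int :=
  (PySem.List.enumerate s.reverse 0).foldl (fun acc p => acc + pvDigitVal p.2 * b ^ p.1.toNat) 0

-- the 'while num > 0' loop of in_base_x: prepending str(num % base) each turn means
-- repr(num) = repr(num // base) ++ str(num % base); fuel num.toNat suffices for base ≥ 2
def pvToBaseLoop (b : Int) (num : Int) : Nat → List Char
  | 0 => []
  | fuel+1 =>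
    if 0 < num then
      pvToBaseLoop b (PySem.Int.floordiv num b) fuel ++ PySem.Int.toChars (PySem.Int.mod num b)
    else []

def pvToBase (num b : Int) : List Char := pvToBaseLoop b num num.toNat

-- one body of A's for-loop after the memo bookkeeping: y = sorted digits, x = reversed,
-- z = x - y in base b, back to a string right-justified to width k with '0'
def pvStep (b : Int) (k : Nat) (s : List Char) : List Char :=
  let y := PySem.List.sorted s (fun c => c) false
  let x := y.reverse
  let z := pvFromBase x b - pvFromBase y b
  let zs := pvToBase z b
  List.replicate (k - zs.length) '0' ++ zs   -- .rjust(k, '0')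

-- A's loop needs at most b^k + 1 iterations (at most b^k distinct k-digit states); the
-- fuel is a totality device only, proved never to run out under Pre_solution
def pvFuelA (b : Int) (k : Nat) : Nat := b.toNat ^ k + 1

def pvLoopA (b : Int) (k : Nat) (numbers : PySem.Dict (List Char) Int) (n : List Char) (i : Int) : Nat → Int
  | 0 => 0
  | fuel+1 =>
    let numbers' := numbers.insert n i
    let n' := pvStep b k n
    if numbers'.contains n' then (PySem.Dict.size numbers' : Int) - numbers'.getD n' 0
    else pvLoopA b k numbers' n' (i+1) fuel

def solution (n : String) (b : Int) : Int :=
  pvLoopA b n.toList.length PySem.Dict.empty n.toList 0 (pvFuelA b n.toList.length)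

-- ===== PORT B =====

-- 'while slow != fast: slow, fast = step(slow), step(step(fast))'
def pvFloydLoop (g : List Char → List Char) (slow fast : List Char) : Nat → List Char
  | 0 => slow
  | fuel+1 => if slow = fast then slow else pvFloydLoop g (g slow) (g (g fast)) fuel

-- 'length, p = 1, step(slow); while p != slow: length, p = length + 1, step(p)'
def pvCycleLoop (g : List Char → List Char) (m p : List Char) (c : Int) : Nat → Int
  | 0 => c
  | fuel+1 => if p = m then c else pvCycleLoop g m (g p) (c+1) fuel

-- the meeting index is at most (tail+cycle)·cycle ≤ b^k · b^k; totality fuel as above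
def pvFuelB (b : Int) (k : Nat) : Nat := b.toNat ^ k * b.toNat ^ k + 1

def solution_alt (n : String) (b : Int) : Int :=
  let s := n.toList
  let g := pvStep b s.length
  let m := pvFloydLoop g (g s) (g (g s)) (pvFuelB b s.length)
  pvCycleLoop g m (g m) 1 (pvFuelB b s.length)

-- ===== PRECONDITION & SPEC =====
-- Pre_ excludes exactly the inputs where A raises ValueError: a base outside 2..10, or a
-- character of n that is not a digit below the base.
def pvDigitsOk (n : String) (b : Int) : Bool :=
  n.toList.all (fun c => 48 ≤ c.toNat && decide ((c.toNat : Int) < 48 + b))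

def Pre_solution (n : String) (b : Int) : Prop :=
  2 ≤ b ∧ b ≤ 10 ∧ pvDigitsOk n b = true
instance (n : String) (b : Int) : Decidable (Pre_solution n b) := by unfold Pre_solution; infer_instance

def pvWitness_solution : String × Int := ("1", 2)

def Spec_solution (n : String) (b : Int) (out : Int) : Prop := out = solution_alt n b
instance (n : String) (b : Int) (out : Int) : Decidable (Spec_solution n b out) := by unfold Spec_solution; infer_instance

-- ===== CLAIM (what is proved, stated in full; the proofs are below) =====
def Claim_equal_solution : Prop := ∀ (n : String) (b : Int), Dom_solution n b → Pre_solution n b → Spec_solution n b (solution n b)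

-- ===== LEMMAS AND PROOFS =====

-- all digits of s are digits below base b
def pvValid (b : Int) (s : List Char) : Prop := ∀ c ∈ s, 48 ≤ c.toNat ∧ (c.toNat : Int) < 48 + b

-- least-significant-digit-first value of a digit string
def pvEv (b : Int) : List Char → Int
  | [] => 0
  | c :: r => pvDigitVal c + b * pvEv b r

theorem pvFoldEnum (b : Int) (l : List Char) : ∀ (s : Nat) (acc : Int),
    (PySem.List.enumerate l (s : Int)).foldl (fun a p => a + pvDigitVal p.2 * b ^ p.1.toNat) acc
      = acc + b ^ s * pvEv b l := by
  induction l with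
  | nil => intro s acc; simp [PySem.List.enumerate, pvEv]
  | cons c r ih =>
    intro s acc
    rw [PySem.List.enumerate_cons]
    simp only [List.foldl_cons]
    have h1 : ((s : Int) + 1) = ((s + 1 : Nat) : Int) := by push_cast; ring
    rw [h1, ih (s + 1)]
    simp only [Int.toNat_natCast, pvEv]
    ring

theorem pvFromBase_eq (s : List Char) (b : Int) : pvFromBase s b = pvEv b s.reverse := by
  have := pvFoldEnum b s.reverse 0 0
  simpa [pvFromBase] using this

theorem pvEv_nonneg (b : Int) (hb : 2 ≤ b) (s : List Char) (hv : pvValid b s) : 0 ≤ pvEv b s := by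
  induction s with
  | nil => simp [pvEv]
  | cons c r ih =>
    have hc := hv c (List.mem_cons_self ..)
    have hc' : (48 : Int) ≤ (c.toNat : Int) := by exact_mod_cast hc.1
    have hr : 0 ≤ pvEv b r := ih (fun x hx => hv x (List.mem_cons_of_mem _ hx))
    simp only [pvEv, pvDigitVal]
    have : 0 ≤ b * pvEv b r := mul_nonneg (by omega) hr
    omega

theorem pvEv_lt (b : Int) (hb : 2 ≤ b) (s : List Char) (hv : pvValid b s) :
    pvEv b s < b ^ s.length := by
  induction s with
  | nil => simp [pvEv]
  | cons c r ih =>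
    have hc := hv c (List.mem_cons_self ..)
    have hc' : pvDigitVal c < b := by simp only [pvDigitVal]; omega
    have hr : pvEv b r < b ^ r.length := ih (fun x hx => hv x (List.mem_cons_of_mem _ hx))
    simp only [pvEv, List.length_cons, pow_succ]
    have h2 : b * pvEv b r ≤ b * (b ^ r.length - 1) :=
      mul_le_mul_of_nonneg_left (by omega) (by omega)
    calc pvDigitVal c + b * pvEv b r ≤ pvDigitVal c + b * (b ^ r.length - 1) := by omega
    _ < b + b * (b ^ r.length - 1) := by omega
    _ = b ^ r.length * b := by ring


theorem pvEv_inj (b : Int) (hb : 2 ≤ b) (s t : List Char) (hs : pvValid b s) (ht : pvValid b t)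
    (hl : s.length = t.length) (he : pvEv b s = pvEv b t) : s = t := by
  induction s generalizing t with
  | nil => cases t with
    | nil => rfl
    | cons d q => simp at hl
  | cons c r ih =>
    cases t with
    | nil => simp at hl
    | cons d q =>
      have hc := hs c (List.mem_cons_self ..)
      have hd := ht d (List.mem_cons_self ..)
      have hcb : 0 ≤ pvDigitVal c ∧ pvDigitVal c < b := by simp only [pvDigitVal]; omega
      have hdb : 0 ≤ pvDigitVal d ∧ pvDigitVal d < b := by simp only [pvDigitVal]; omega
      simp only [pvEv] at he
      -- take both sides modulo b to identify the low digit
      have hm := congrArg (fun z => z % b) he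
      simp only [Int.add_mul_emod_self_left] at hm
      have hmc : pvDigitVal c % b = pvDigitVal c := Int.emod_eq_of_lt hcb.1 hcb.2
      have hmd : pvDigitVal d % b = pvDigitVal d := Int.emod_eq_of_lt hdb.1 hdb.2
      rw [hmc, hmd] at hm
      have hcd : c = d := by
        have : c.toNat = d.toNat := by simp only [pvDigitVal] at hm; omega
        have h2 := congrArg Char.ofNat this
        rwa [Char.ofNat_toNat, Char.ofNat_toNat] at h2
      have hq : pvEv b r = pvEv b q := by
        rw [hm] at he
        have := add_left_cancel he
        exact mul_left_cancel₀ (by omega) this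
      have := ih q (fun x hx => hs x (List.mem_cons_of_mem _ hx))
        (fun x hx => ht x (List.mem_cons_of_mem _ hx)) (by simpa using hl) hq
      rw [hcd, this]

theorem pvMod_eq (a b : Int) (hb : 0 < b) : PySem.Int.mod a b = a % b := by
  simp [PySem.Int.mod, Int.fmod_eq_emod, hb.le]

theorem pvToChars_digit (m : Int) (h0 : 0 ≤ m) (h9 : m ≤ 9) :
    ∃ c, PySem.Int.toChars m = [c] ∧ (c.toNat : Int) = 48 + m := by
  interval_cases m <;> exact ⟨_, rfl, by decide⟩

theorem pvDigit_valid (b m : Int) (hb10 : b ≤ 10) (h0 : 0 ≤ m) (hmb : m < b) :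
    pvValid b (PySem.Int.toChars m) := by
  obtain ⟨c0, hc0, hcn⟩ := pvToChars_digit m h0 (by omega)
  rw [hc0]
  intro c hc
  simp only [List.mem_singleton] at hc
  subst hc
  omega

theorem pvToBaseLoop_nonpos (b num : Int) (h : num ≤ 0) :
    ∀ fuel, pvToBaseLoop b num fuel = [] := by
  intro fuel
  cases fuel with
  | zero => rfl
  | succ f => simp [pvToBaseLoop, not_lt.2 h]

theorem pvToBaseLoop_succ_pos (b num : Int) (f : Nat) (hn : 0 < num) :
    pvToBaseLoop b num (f + 1)
      = pvToBaseLoop b (PySem.Int.floordiv num b) f ++ PySem.Int.toChars (PySem.Int.mod num b) := by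
  simp [pvToBaseLoop, hn]

theorem pvFloordiv_facts (b num : Int) (hb : 2 ≤ b) (hn : 0 < num) :
    0 ≤ PySem.Int.floordiv num b ∧ PySem.Int.floordiv num b < num := by
  constructor
  · rw [PySem.Int.le_floordiv_iff_mul_le (by omega)]; omega
  · rw [PySem.Int.floordiv_lt_iff_lt_mul (by omega)]
    have := mul_lt_mul_of_pos_left (show (1:Int) < b by omega) hn
    omega

theorem pvToBaseLoop_fuel (b : Int) (hb : 2 ≤ b) (num : Int) :
    ∀ fuel, num.toNat ≤ fuel → pvToBaseLoop b num fuel = pvToBase num b := by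
  suffices H : ∀ N num fuel, num.toNat ≤ N → num.toNat ≤ fuel →
      pvToBaseLoop b num fuel = pvToBase (num : Int) b by
    intro fuel h; exact H num.toNat num fuel le_rfl h
  intro N
  induction N with
  | zero =>
    intro num fuel h1 _
    have hnp : num ≤ 0 := by omega
    rw [pvToBaseLoop_nonpos b num hnp, pvToBase, pvToBaseLoop_nonpos b num hnp]
  | succ N ih =>
    intro num fuel h1 h2
    by_cases hnp : num ≤ 0
    · rw [pvToBaseLoop_nonpos b num hnp, pvToBase, pvToBaseLoop_nonpos b num hnp]
    · have hn : 0 < num := by omega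
      obtain ⟨q0, qlt⟩ := pvFloordiv_facts b num hb hn
      obtain ⟨f, rfl⟩ : ∃ f, fuel = f + 1 := ⟨fuel - 1, by omega⟩
      obtain ⟨m, hm⟩ : ∃ m, num.toNat = m + 1 := ⟨num.toNat - 1, by omega⟩
      have hq : (PySem.Int.floordiv num b).toNat ≤ m := by omega
      rw [pvToBaseLoop_succ_pos b num f hn]
      rw [pvToBase, hm, pvToBaseLoop_succ_pos b num m hn]
      rw [ih _ f (by omega) (by omega), ih _ m (by omega) (by omega)]

theorem pvToBase_step (b : Int) (hb : 2 ≤ b) (num : Int) (hn : 0 < num) :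
    pvToBase num b
      = pvToBase (PySem.Int.floordiv num b) b ++ PySem.Int.toChars (PySem.Int.mod num b) := by
  obtain ⟨m, hm⟩ : ∃ m, num.toNat = m + 1 := ⟨num.toNat - 1, by omega⟩
  obtain ⟨q0, qlt⟩ := pvFloordiv_facts b num hb hn
  rw [pvToBase, hm, pvToBaseLoop_succ_pos b num m hn,
    pvToBaseLoop_fuel b hb _ m (by omega)]


theorem pvToBase_valid (b : Int) (hb : 2 ≤ b) (hb10 : b ≤ 10) (num : Int) :
    pvValid b (pvToBase num b) := by
  suffices H : ∀ N num, num.toNat ≤ N → pvValid b (pvToBase (num : Int) b) from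
    H num.toNat num le_rfl
  intro N
  induction N with
  | zero =>
    intro num h1
    rw [pvToBase, pvToBaseLoop_nonpos b num (by omega)]
    intro c hc; simp at hc
  | succ N ih =>
    intro num h1
    by_cases hnp : num ≤ 0
    · rw [pvToBase, pvToBaseLoop_nonpos b num hnp]; intro c hc; simp at hc
    · have hn : 0 < num := by omega
      obtain ⟨q0, qlt⟩ := pvFloordiv_facts b num hb hn
      rw [pvToBase_step b hb num hn]
      intro c hc
      rcases List.mem_append.1 hc with hc | hc
      · exact ih _ (by omega) c hc
      · have hmod : PySem.Int.mod num b = num % b := pvMod_eq num b (by omega)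
        refine pvDigit_valid b (PySem.Int.mod num b) hb10 ?_ ?_ c hc
        · rw [hmod]; exact Int.emod_nonneg num (by omega)
        · rw [hmod]; exact Int.emod_lt_of_pos num (by omega)

theorem pvToBase_len (b : Int) (hb : 2 ≤ b) (hb10 : b ≤ 10) (num : Int) (j : Nat) (h : num < b ^ j) :
    (pvToBase num b).length ≤ j := by
  suffices H : ∀ N num j, num.toNat ≤ N → (num : Int) < b ^ j → (pvToBase (num : Int) b).length ≤ j from
    H num.toNat num j le_rfl h
  clear h num j
  intro N
  induction N with
  | zero =>
    intro num j h1 _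
    rw [pvToBase, pvToBaseLoop_nonpos b num (by omega)]
    simp
  | succ N ih =>
    intro num j h1 hj
    by_cases hnp : num ≤ 0
    · rw [pvToBase, pvToBaseLoop_nonpos b num hnp]; simp
    · have hn : 0 < num := by omega
      obtain ⟨q0, qlt⟩ := pvFloordiv_facts b num hb hn
      obtain ⟨j', rfl⟩ : ∃ j', j = j' + 1 := by
        rcases j with _ | j'
        · exfalso; simp at hj; omega
        · exact ⟨j', rfl⟩
      rw [pvToBase_step b hb num hn]
      rw [List.length_append]
      have hq : PySem.Int.floordiv num b < b ^ j' := by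
        rw [PySem.Int.floordiv_lt_iff_lt_mul (by omega)]
        rw [pow_succ] at hj; exact hj
      have h1' := ih (PySem.Int.floordiv num b) j' (by omega) hq
      have hmod : PySem.Int.mod num b = num % b := pvMod_eq num b (by omega)
      obtain ⟨c0, hc0, _⟩ := pvToChars_digit (PySem.Int.mod num b)
        (by rw [hmod]; exact Int.emod_nonneg num (by omega))
        (by rw [hmod]; have := Int.emod_lt_of_pos num (show (0:Int) < b by omega); omega)
      rw [hc0]
      set L := (pvToBase (PySem.Int.floordiv num b) b).length with hL
      show L + [c0].length ≤ j' + 1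
      simp only [List.length_cons, List.length_nil]
      omega

theorem pvStep_valid (b : Int) (hb : 2 ≤ b) (hb10 : b ≤ 10) (k : Nat) (s : List Char)
    (hv : pvValid b s) (hl : s.length = k) :
    pvValid b (pvStep b k s) ∧ (pvStep b k s).length = k := by
  simp only [pvStep]
  set y := PySem.List.sorted s (fun c => c) false with hy
  have hyv : pvValid b y := fun c hc => hv c ((PySem.List.sorted_perm s _ _).mem_iff.1 hc)
  have hylen : y.length = k := by rw [(PySem.List.sorted_perm s _ _).length_eq, hl]
  have hx : pvFromBase y.reverse b = pvEv b y := by rw [pvFromBase_eq, List.reverse_reverse]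
  have hyrv : pvValid b y.reverse := fun c hc => hyv c (List.mem_reverse.1 hc)
  have hzlt : pvFromBase y.reverse b - pvFromBase y b < b ^ k := by
    have h1 : pvEv b y < b ^ k := by
      have := pvEv_lt b hb y hyv; rwa [hylen] at this
    have h2 : 0 ≤ pvEv b y.reverse :=
      pvEv_nonneg b hb y.reverse hyrv
    rw [hx, pvFromBase_eq]
    omega
  set z := pvFromBase y.reverse b - pvFromBase y b with hz
  have hzs_valid : pvValid b (pvToBase z b) := pvToBase_valid b hb hb10 z
  have hzs_len : (pvToBase z b).length ≤ k := pvToBase_len b hb hb10 z k hzlt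
  constructor
  · intro c hc
    rcases List.mem_append.1 hc with hc | hc
    · have := List.eq_of_mem_replicate hc
      subst this
      refine ⟨by decide, ?_⟩
      have : ('0'.toNat : Int) = 48 := by decide
      omega
    · exact hzs_valid c hc
  · rw [List.length_append, List.length_replicate]
    omega

theorem pvIter_valid (b : Int) (hb : 2 ≤ b) (hb10 : b ≤ 10) (k : Nat) (x₀ : List Char)
    (hv : pvValid b x₀) (hl : x₀.length = k) :
    ∀ t, pvValid b ((pvStep b k)^[t] x₀) ∧ ((pvStep b k)^[t] x₀).length = k := by
  intro t
  induction t with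
  | zero => exact ⟨hv, hl⟩
  | succ t ih =>
    rw [Function.iterate_succ_apply']
    exact pvStep_valid b hb hb10 k _ ih.1 ih.2

-- the orbit of the step map
def pvO (b : Int) (k : Nat) (x₀ : List Char) (t : Nat) : List Char := (pvStep b k)^[t] x₀

theorem pvO_succ (b : Int) (k : Nat) (x₀ : List Char) (t : Nat) :
    pvO b k x₀ (t + 1) = pvStep b k (pvO b k x₀ t) := Function.iterate_succ_apply' ..

theorem pvO_eq_of_enc (b : Int) (hb : 2 ≤ b) (hb10 : b ≤ 10) (k : Nat) (x₀ : List Char)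
    (hv : pvValid b x₀) (hl : x₀.length = k) (i j : Nat)
    (h : pvEv b ((pvO b k x₀ i).reverse) = pvEv b ((pvO b k x₀ j).reverse)) :
    pvO b k x₀ i = pvO b k x₀ j := by
  obtain ⟨hvi, hli⟩ := pvIter_valid b hb hb10 k x₀ hv hl i
  obtain ⟨hvj, hlj⟩ := pvIter_valid b hb hb10 k x₀ hv hl j
  have := pvEv_inj b hb _ _ (fun c hc => hvi c (List.mem_reverse.1 hc))
    (fun c hc => hvj c (List.mem_reverse.1 hc))
    (by simp [hli, hlj]) h
  have := congrArg List.reverse this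
  simpa using this

theorem pvEv_orbit_bounds (b : Int) (hb : 2 ≤ b) (hb10 : b ≤ 10) (k : Nat) (x₀ : List Char)
    (hv : pvValid b x₀) (hl : x₀.length = k) (t : Nat) :
    0 ≤ pvEv b ((pvO b k x₀ t).reverse) ∧ pvEv b ((pvO b k x₀ t).reverse) < b ^ k := by
  obtain ⟨hvt, hlt⟩ := pvIter_valid b hb hb10 k x₀ hv hl t
  rw [show ((pvStep b k)^[t] x₀) = pvO b k x₀ t from rfl] at hvt hlt
  have hvr : pvValid b (pvO b k x₀ t).reverse := fun c hc => hvt c (List.mem_reverse.1 hc)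
  refine ⟨pvEv_nonneg b hb _ hvr, ?_⟩
  have := pvEv_lt b hb _ hvr
  rwa [List.length_reverse, hlt] at this

theorem pvEvPer (b : Int) (hb : 2 ≤ b) (hb10 : b ≤ 10) (x₀ : List Char) (hv : pvValid b x₀) :
    ∃ μ lam, 1 ≤ lam ∧ μ + lam ≤ b.toNat ^ x₀.length ∧
      ∀ a c, a < c →
        (pvO b x₀.length x₀ a = pvO b x₀.length x₀ c ↔ μ ≤ a ∧ lam ∣ (c - a)) := by
  set k := x₀.length with hk
  set g := pvStep b k with hg
  set N := b.toNat ^ k with hN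
  have hl : x₀.length = k := rfl
  have hNpos : 0 < N := by
    have : 0 < b.toNat := by omega
    exact pow_pos this k
  have hbN : ((b.toNat : Int)) = b := Int.toNat_of_nonneg (by omega)
  have hpow : ((N : Nat) : Int) = b ^ k := by rw [hN]; push_cast; rw [hbN]
  -- the encoding of each orbit point is a natural number below N
  set enc : Nat → Nat := fun t => (pvEv b ((pvO b k x₀ t).reverse)).toNat with henc
  have hencN : ∀ t, enc t < N := by
    intro t
    obtain ⟨h0, hlt⟩ := pvEv_orbit_bounds b hb hb10 k x₀ hv hl t
    rw [henc]
    rw [Int.toNat_lt' (by omega), hpow]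
    exact hlt
  have hencE : ∀ i j, enc i = enc j → pvO b k x₀ i = pvO b k x₀ j := by
    intro i j h
    refine pvO_eq_of_enc b hb hb10 k x₀ hv hl i j ?_
    obtain ⟨h0i, _⟩ := pvEv_orbit_bounds b hb hb10 k x₀ hv hl i
    obtain ⟨h0j, _⟩ := pvEv_orbit_bounds b hb hb10 k x₀ hv hl j
    simp only [henc] at h
    omega
  -- pigeonhole: some two of the first N+1 orbit points coincide
  obtain ⟨i, hi, j, hj, hij, hije⟩ :=
    Finset.exists_ne_map_eq_of_card_lt_of_maps_to
      (s := Finset.range (N + 1)) (t := Finset.range N)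
      (by simp) (f := enc) (fun a _ => Finset.mem_range.2 (hencN a))
  have hper : ∀ i j : Nat, i < j → pvO b k x₀ i = pvO b k x₀ j →
      Function.IsPeriodicPt g (j - i) (pvO b k x₀ i) := by
    intro i j hlt he
    show g^[j - i] (g^[i] x₀) = g^[i] x₀
    rw [← Function.iterate_add_apply, show (j - i) + i = j by omega]
    exact he.symm
  have hPP : ∃ m, pvO b k x₀ m ∈ Function.periodicPts g := by
    rcases Nat.lt_or_ge i j with hlt | hge
    · exact ⟨i, Function.mem_periodicPts.2 ⟨j - i, by omega, hper i j hlt (hencE i j hije)⟩⟩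
    · have hlt : j < i := by omega
      exact ⟨j, Function.mem_periodicPts.2 ⟨i - j, by omega, hper j i hlt (hencE j i hije.symm)⟩⟩
  letI : DecidablePred (fun m => pvO b k x₀ m ∈ Function.periodicPts g) :=
    fun _ => Classical.propDecidable _
  set μ := Nat.find hPP with hμ
  set lam := Function.minimalPeriod g (pvO b k x₀ μ) with hlam
  have hμmem : pvO b k x₀ μ ∈ Function.periodicPts g := Nat.find_spec hPP
  have hlam1 : 1 ≤ lam := Function.minimalPeriod_pos_of_mem_periodicPts hμmem
  -- every orbit point from μ on is periodic with the same minimal period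
  have P1 : ∀ d, pvO b k x₀ (μ + d) ∈ Function.periodicPts g ∧
      Function.minimalPeriod g (pvO b k x₀ (μ + d)) = lam := by
    intro d
    induction d with
    | zero => exact ⟨hμmem, rfl⟩
    | succ d ih =>
      have hs : pvO b k x₀ (μ + (d + 1)) = g (pvO b k x₀ (μ + d)) := by
        rw [show μ + (d + 1) = (μ + d) + 1 by omega, pvO_succ]
      constructor
      · rw [hs]
        obtain ⟨n, hn, hp⟩ := Function.mem_periodicPts.1 ih.1
        exact Function.mem_periodicPts.2 ⟨n, hn, hp.apply⟩
      · rw [hs, Function.minimalPeriod_apply ih.1, ih.2]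
  have P1' : ∀ a, μ ≤ a → pvO b k x₀ a ∈ Function.periodicPts g ∧
      Function.minimalPeriod g (pvO b k x₀ a) = lam := by
    intro a ha
    have := P1 (a - μ)
    rwa [show μ + (a - μ) = a by omega] at this
  have P2 : ∀ a c, a < c → pvO b k x₀ a = pvO b k x₀ c → μ ≤ a ∧ lam ∣ (c - a) := by
    intro a c hac he
    have hp := hper a c hac he
    have hmem : pvO b k x₀ a ∈ Function.periodicPts g :=
      Function.mem_periodicPts.2 ⟨c - a, by omega, hp⟩
    have hμa : μ ≤ a := Nat.find_min' hPP hmem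
    refine ⟨hμa, ?_⟩
    have := hp.minimalPeriod_dvd
    rwa [(P1' a hμa).2] at this
  have P3 : ∀ a d, μ ≤ a → lam ∣ d → pvO b k x₀ (a + d) = pvO b k x₀ a := by
    intro a d ha hd
    obtain ⟨e, rfl⟩ := hd
    have hlp : Function.IsPeriodicPt g lam (pvO b k x₀ a) := by
      rw [← (P1' a ha).2]
      exact Function.iterate_minimalPeriod
    have hp := hlp.mul_const e
    have : g^[lam * e] (g^[a] x₀) = g^[lam * e + a] x₀ := (Function.iterate_add_apply g _ a x₀).symm
    show (g^[a + lam * e] x₀ : List Char) = g^[a] x₀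
    rw [show a + lam * e = lam * e + a by omega, ← this]
    exact hp
  -- distinctness of the first μ + lam orbit points gives the size bound
  have hdist : ∀ a c, a < c → c < μ + lam → pvO b k x₀ a ≠ pvO b k x₀ c := by
    intro a c hac hc he
    obtain ⟨hμa, hdvd⟩ := P2 a c hac he
    have := Nat.le_of_dvd (by omega) hdvd
    omega
  have hcard : μ + lam ≤ N := by
    have := Finset.card_le_card_of_injOn (s := Finset.range (μ + lam)) (t := Finset.range N)
      enc (fun a _ => Finset.mem_range.2 (hencN a)) ?_
    · simpa using this
    · intro a ha c hc he
      by_contra hne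
      rcases Nat.lt_or_ge a c with h1 | h1
      · exact hdist a c h1 (Finset.mem_range.1 (by simpa using hc)) (hencE a c he)
      · have h2 : c < a := by omega
        exact hdist c a h2 (Finset.mem_range.1 (by simpa using ha)) (hencE c a he.symm)
  refine ⟨μ, lam, hlam1, hcard, ?_⟩
  intro a c hac
  constructor
  · exact P2 a c hac
  · rintro ⟨ha, hd⟩
    have := P3 a (c - a) ha hd
    rw [show a + (c - a) = c by omega] at this
    exact this.symm

-- the memo dict after t iterations of A's loop
def pvDictAt (b : Int) (k : Nat) (x₀ : List Char) (t : Nat) : PySem.Dict (List Char) Int :=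
  PySem.Dict.mk ((List.range t).map (fun j => (pvO b k x₀ j, (j : Int))))

theorem pvDictAt_keys (b : Int) (k : Nat) (x₀ : List Char) (t : Nat) :
    (pvDictAt b k x₀ t).keys = (List.range t).map (pvO b k x₀) := by
  simp [pvDictAt, PySem.Dict.keys]

theorem pvDictAt_contains (b : Int) (k : Nat) (x₀ : List Char) (t : Nat) (s : List Char) :
    (pvDictAt b k x₀ t).contains s = true ↔ ∃ j < t, pvO b k x₀ j = s := by
  rw [PySem.Dict.contains_iff_mem_keys, pvDictAt_keys]
  simp

theorem pvLoopA_run (b : Int) (k : Nat) (x₀ : List Char) (μ lam : Nat) (hlam1 : 1 ≤ lam)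
    (hiff : ∀ a c, a < c → (pvO b k x₀ a = pvO b k x₀ c ↔ μ ≤ a ∧ lam ∣ (c - a))) :
    ∀ d t fuel, t + d + 1 = μ + lam → d < fuel →
      pvLoopA b k (pvDictAt b k x₀ t) (pvO b k x₀ t) (t : Int) fuel = (lam : Int) := by
  have hdist : ∀ a c, a < c → c < μ + lam → pvO b k x₀ a ≠ pvO b k x₀ c := by
    intro a c hac hc he
    obtain ⟨hμa, hdvd⟩ := (hiff a c hac).1 he
    have := Nat.le_of_dvd (by omega) hdvd
    omega
  have hne : ∀ a c, a < μ + lam → c < μ + lam → pvO b k x₀ a = pvO b k x₀ c → a = c := by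
    intro a c ha hc he
    by_contra hnab
    rcases Nat.lt_or_ge a c with h | h
    · exact hdist a c h hc he
    · exact hdist c a (by omega) ha he.symm
  have hOT : pvO b k x₀ (μ + lam) = pvO b k x₀ μ :=
    ((hiff μ (μ + lam) (by omega)).2 ⟨le_rfl, by simp⟩).symm
  -- inserting the fresh current state extends the memo dict
  have hins : ∀ t, t + 1 ≤ μ + lam →
      (pvDictAt b k x₀ t).insert (pvO b k x₀ t) (t : Int) = pvDictAt b k x₀ (t + 1) := by
    intro t ht
    have hfresh : (pvDictAt b k x₀ t).contains (pvO b k x₀ t) = false := by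
      rw [Bool.eq_false_iff]
      intro hcon
      obtain ⟨j, hj, hje⟩ := (pvDictAt_contains b k x₀ t _).1 hcon
      exact absurd (hne j t (by omega) (by omega) hje) (by omega)
    apply PySem.Dict.ext
    rw [PySem.Dict.items_insert_of_not_contains _ _ hfresh]
    simp [pvDictAt, List.range_succ]
  have hnodup : ∀ t, t ≤ μ + lam → (pvDictAt b k x₀ t).keys.Nodup := by
    intro t ht
    rw [pvDictAt_keys]
    refine List.Nodup.map_on ?_ List.nodup_range
    intro a ha c hc he
    exact hne a c (by simp at ha; omega) (by simp at hc; omega) he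
  intro d
  induction d with
  | zero =>
    intro t fuel ht hfuel
    obtain ⟨f, rfl⟩ : ∃ f, fuel = f + 1 := ⟨fuel - 1, by omega⟩
    simp only [pvLoopA]
    rw [hins t (by omega), ← pvO_succ]
    have hT : t + 1 = μ + lam := by omega
    rw [hT, hOT]
    have hcon : (pvDictAt b k x₀ (μ + lam)).contains (pvO b k x₀ μ) = true :=
      (pvDictAt_contains ..).2 ⟨μ, by omega, rfl⟩
    rw [hcon]
    simp only [if_true]
    have hsize : PySem.Dict.size (pvDictAt b k x₀ (μ + lam)) = μ + lam := by
      simp [pvDictAt, PySem.Dict.size]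
    have hget : (pvDictAt b k x₀ (μ + lam)).getD (pvO b k x₀ μ) 0 = (μ : Int) := by
      refine PySem.Dict.getD_of_mem_items _ ?_ (hnodup _ le_rfl) 0
      simp only [pvDictAt, List.mem_map]
      exact ⟨μ, by simp; omega, rfl⟩
    rw [hsize, hget]
    push_cast
    omega
  | succ d ih =>
    intro t fuel ht hfuel
    obtain ⟨f, rfl⟩ : ∃ f, fuel = f + 1 := ⟨fuel - 1, by omega⟩
    simp only [pvLoopA]
    rw [hins t (by omega), ← pvO_succ]
    have hcon : (pvDictAt b k x₀ (t + 1)).contains (pvO b k x₀ (t + 1)) = false := by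
      rw [Bool.eq_false_iff]
      intro hc
      obtain ⟨j, hj, hje⟩ := (pvDictAt_contains ..).1 hc
      exact absurd (hne j (t + 1) (by omega) (by omega) hje) (by omega)
    rw [hcon]
    simp only [Bool.false_eq_true, if_false]
    have : ((t : Int) + 1) = ((t + 1 : Nat) : Int) := by push_cast; ring
    rw [this]
    exact ih (t + 1) f (by omega) (by omega)

theorem pvFloydLoop_run (b : Int) (k : Nat) (x₀ : List Char) (tst : Nat)
    (hmeet : pvO b k x₀ tst = pvO b k x₀ (2 * tst))
    (hmin : ∀ u, 1 ≤ u → u < tst → pvO b k x₀ u ≠ pvO b k x₀ (2 * u)) :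
    ∀ d t fuel, 1 ≤ t → t + d = tst → d < fuel →
      pvFloydLoop (pvStep b k) (pvO b k x₀ t) (pvO b k x₀ (2 * t)) fuel = pvO b k x₀ tst := by
  intro d
  induction d with
  | zero =>
    intro t fuel h1 ht hfuel
    obtain ⟨f, rfl⟩ : ∃ f, fuel = f + 1 := ⟨fuel - 1, by omega⟩
    have ht' : t = tst := by omega
    subst ht'
    simp only [pvFloydLoop]
    rw [if_pos hmeet]
  | succ d ih =>
    intro t fuel h1 ht hfuel
    obtain ⟨f, rfl⟩ : ∃ f, fuel = f + 1 := ⟨fuel - 1, by omega⟩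
    simp only [pvFloydLoop]
    rw [if_neg (hmin t h1 (by omega))]
    rw [← pvO_succ, ← pvO_succ, ← pvO_succ, show 2 * t + 1 + 1 = 2 * (t + 1) by ring]
    exact ih (t + 1) f (by omega) (by omega) (by omega)

theorem pvCycleLoop_run (b : Int) (k : Nat) (x₀ : List Char) (tst lam : Nat) (hlam1 : 1 ≤ lam)
    (heq : ∀ c, 1 ≤ c → (pvO b k x₀ (tst + c) = pvO b k x₀ tst ↔ lam ∣ c)) :
    ∀ d c fuel, 1 ≤ c → c + d = lam → d < fuel →
      pvCycleLoop (pvStep b k) (pvO b k x₀ tst) (pvO b k x₀ (tst + c)) (c : Int) fuel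
        = (lam : Int) := by
  intro d
  induction d with
  | zero =>
    intro c fuel h1 hc hfuel
    obtain ⟨f, rfl⟩ : ∃ f, fuel = f + 1 := ⟨fuel - 1, by omega⟩
    have hc' : c = lam := by omega
    rw [hc']
    simp only [pvCycleLoop]
    rw [if_pos ((heq lam hlam1).2 dvd_rfl)]
  | succ d ih =>
    intro c fuel h1 hc hfuel
    obtain ⟨f, rfl⟩ : ∃ f, fuel = f + 1 := ⟨fuel - 1, by omega⟩
    simp only [pvCycleLoop]
    have hne : pvO b k x₀ (tst + c) ≠ pvO b k x₀ tst := by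
      intro he
      have := Nat.le_of_dvd (by omega) ((heq c h1).1 he)
      omega
    rw [if_neg hne]
    rw [← pvO_succ, show tst + c + 1 = tst + (c + 1) by ring]
    have : ((c : Int) + 1) = ((c + 1 : Nat) : Int) := by push_cast; ring
    rw [this]
    exact ih (c + 1) f (by omega) (by omega) (by omega)

theorem pvMain (n : String) (b : Int) (hpre : Pre_solution n b) :
    solution n b = solution_alt n b := by
  obtain ⟨hb, hb10, hvS⟩ := hpre
  set x₀ := n.toList with hx₀
  have hv : pvValid b x₀ := by
    intro c hc
    have h := List.all_eq_true.1 hvS c hc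
    simp only [Bool.and_eq_true, decide_eq_true_eq] at h
    exact h
  obtain ⟨μ, lam, hlam1, hcard, hiff⟩ := pvEvPer b hb hb10 x₀ hv
  have hN1 : 0 < b.toNat ^ x₀.length := pow_pos (by omega) _
  -- A returns lam
  have hA : solution n b = (lam : Int) := by
    show pvLoopA b x₀.length PySem.Dict.empty x₀ 0 (pvFuelA b x₀.length) = (lam : Int)
    have h0 : (PySem.Dict.empty : PySem.Dict (List Char) Int) = pvDictAt b x₀.length x₀ 0 := rfl
    have h1 : x₀ = pvO b x₀.length x₀ 0 := rfl
    have h2 : (0 : Int) = ((0 : Nat) : Int) := rfl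
    rw [h0, h1, h2]
    exact pvLoopA_run b x₀.length x₀ μ lam hlam1 hiff (μ + lam - 1) 0 (pvFuelA b x₀.length)
      (by omega) (by rw [pvFuelA]; omega)
  -- the first Floyd meeting point
  letI : DecidablePred (fun c => 1 ≤ c ∧ pvO b x₀.length x₀ c = pvO b x₀.length x₀ (2 * c)) :=
    fun _ => Classical.propDecidable _
  have hPval : 1 ≤ lam * (μ + 1) ∧
      pvO b x₀.length x₀ (lam * (μ + 1)) = pvO b x₀.length x₀ (2 * (lam * (μ + 1))) := by
    have hp : 0 < lam * (μ + 1) := Nat.mul_pos (by omega) (by omega)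
    refine ⟨hp, ?_⟩
    refine (hiff _ _ (by omega)).2 ⟨?_, ?_⟩
    · calc μ ≤ μ + 1 := by omega
        _ ≤ lam * (μ + 1) := Nat.le_mul_of_pos_left _ (by omega)
    · exact ⟨μ + 1, by ring_nf; omega⟩
  have hPex : ∃ c, 1 ≤ c ∧ pvO b x₀.length x₀ c = pvO b x₀.length x₀ (2 * c) :=
    ⟨lam * (μ + 1), hPval⟩
  set tst := Nat.find hPex with htst
  obtain ⟨htst1, hmeet⟩ := Nat.find_spec hPex
  have hmin : ∀ u, 1 ≤ u → u < tst → pvO b x₀.length x₀ u ≠ pvO b x₀.length x₀ (2 * u) := by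
    intro u hu hut he
    exact Nat.find_min hPex hut ⟨hu, he⟩
  have htstle : tst ≤ lam * (μ + 1) := Nat.find_min' hPex hPval
  obtain ⟨hμtst, hdvdtst⟩ := (hiff tst (2 * tst) (by omega)).1 hmeet
  have heq : ∀ c, 1 ≤ c → (pvO b x₀.length x₀ (tst + c) = pvO b x₀.length x₀ tst ↔ lam ∣ c) := by
    intro c hc
    constructor
    · intro he
      have := (hiff tst (tst + c) (by omega)).1 he.symm
      have h2 := this.2
      rwa [show tst + c - tst = c by omega] at h2
    · intro hd
      exact ((hiff tst (tst + c) (by omega)).2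
        ⟨hμtst, by rwa [show tst + c - tst = c by omega]⟩).symm
  have hlamN : lam ≤ b.toNat ^ x₀.length := by omega
  have hμ1N : μ + 1 ≤ b.toNat ^ x₀.length := by omega
  have htstNN : tst ≤ b.toNat ^ x₀.length * b.toNat ^ x₀.length :=
    le_trans htstle (Nat.mul_le_mul hlamN hμ1N)
  have hlamNN : lam ≤ b.toNat ^ x₀.length * b.toNat ^ x₀.length :=
    le_trans hlamN (Nat.le_mul_of_pos_left _ (by omega))
  -- B returns lam
  have hB : solution_alt n b = (lam : Int) := by
    show pvCycleLoop (pvStep b x₀.length)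
        (pvFloydLoop (pvStep b x₀.length) (pvStep b x₀.length x₀)
          (pvStep b x₀.length (pvStep b x₀.length x₀)) (pvFuelB b x₀.length))
        (pvStep b x₀.length (pvFloydLoop (pvStep b x₀.length) (pvStep b x₀.length x₀)
          (pvStep b x₀.length (pvStep b x₀.length x₀)) (pvFuelB b x₀.length)))
        1 (pvFuelB b x₀.length) = (lam : Int)
    have e1 : pvStep b x₀.length x₀ = pvO b x₀.length x₀ 1 := rfl
    have e2 : pvStep b x₀.length (pvStep b x₀.length x₀) = pvO b x₀.length x₀ (2 * 1) := rfl
    rw [e2, e1]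
    have hm : pvFloydLoop (pvStep b x₀.length) (pvO b x₀.length x₀ 1)
        (pvO b x₀.length x₀ (2 * 1)) (pvFuelB b x₀.length) = pvO b x₀.length x₀ tst :=
      pvFloydLoop_run b x₀.length x₀ tst hmeet hmin (tst - 1) 1 (pvFuelB b x₀.length) le_rfl
        (by omega) (by rw [pvFuelB]; omega)
    rw [hm, ← pvO_succ]
    have h1c : (1 : Int) = ((1 : Nat) : Int) := rfl
    rw [h1c]
    exact pvCycleLoop_run b x₀.length x₀ tst lam hlam1 heq (lam - 1) 1 (pvFuelB b x₀.length)
      le_rfl (by omega) (by rw [pvFuelB]; omega)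
  rw [hA, hB]

-- ===== VERDICT (by name: the statement is the Claim_ definition above) =====
theorem solution_spec : Claim_equal_solution := by
  intro n b _ hpre
  exact pvMain n b hpre
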